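-- pv_equiv track=rewrite | github.com/dishakarnayake/DSA-Challenge-180-days- | 37DAY_Isomorphic_String.py | transform
-- ===== SOURCE A (Python) =====
-- def transform(string):
--     mapping = {}
--     transformed = []
--     next_char = 0
--
--     for char in string:
--         if char not in mapping:
--             mapping[char] = next_char
--             next_char += 1
--         transformed.append(mapping[char])
--
--     return transformed
-- ===== SOURCE B (Python) =====
-- def transform(string):
--     chars = list(string)
--     return [len(set(chars[:chars.index(c)])) for c in chars]
-- ===== Notes on version B (the rewrite author's own statement) =====
-- stated objective: alternative
-- what changed: Dropped A's incremental dict/counter state entirely: B computes each character's code by a closed per-character formula -- the number of distinct characters strictly before that character's first occurrence (chars.index + set cardinality) -- trading A's single O(n) stateful pass for a stateless quadratic comprehension.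
import Mathlib
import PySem

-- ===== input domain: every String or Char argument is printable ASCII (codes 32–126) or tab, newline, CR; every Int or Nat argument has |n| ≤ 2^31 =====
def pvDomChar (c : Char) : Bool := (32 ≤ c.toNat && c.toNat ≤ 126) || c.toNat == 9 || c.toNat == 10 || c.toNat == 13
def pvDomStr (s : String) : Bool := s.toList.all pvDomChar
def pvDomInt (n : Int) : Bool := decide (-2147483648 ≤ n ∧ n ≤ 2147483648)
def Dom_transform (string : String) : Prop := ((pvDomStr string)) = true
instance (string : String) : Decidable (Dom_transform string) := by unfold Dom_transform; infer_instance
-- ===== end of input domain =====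

-- B drops A's incremental dict/counter state: each code is computed by a closed per-character
-- formula (distinct characters before the first occurrence), a stateless quadratic comprehension.

-- ===== PORT A =====
-- one loop, state (mapping, transformed, next_char); mapping[char] after a guaranteed insert is getD (KeyError impossible here)
def transform (string : String) : List Int :=
  (string.toList.foldl
    (fun (st : PySem.Dict Char Int × List Int × Int) (c : Char) =>
      if st.1.contains c then
        (st.1, st.2.1 ++ [st.1.getD c 0], st.2.2)
      else
        ((st.1.insert c st.2.2),
         st.2.1 ++ [(st.1.insert c st.2.2).getD c 0],
         st.2.2 + 1))
    (PySem.Dict.empty, [], 0)).2.1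

-- ===== PORT B =====
-- [len(set(chars[:chars.index(c)])) for c in chars]; chars.index(c) is index? (always some here,
-- c is drawn from chars, so ValueError is unreachable and getD 0 is never the default branch)
def transform_alt (string : String) : List Int :=
  let chars : List Char := string.toList
  chars.map (fun c =>
    ((PySem.Set.ofList
        (PySem.List.slice chars none
          (some (((PySem.List.index? chars c).getD 0 : Nat) : Int)))).length : Int))

-- ===== PRECONDITION & SPEC =====
def Spec_transform (string : String) (out : List Int) : Prop := out = transform_alt string
instance (string : String) (out : List Int) : Decidable (Spec_transform string out) := by unfold Spec_transform; infer_instance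

-- ===== CLAIM (what is proved, stated in full; the proofs are below) =====
def Claim_equal_transform : Prop := ∀ (string : String), Dom_transform string → Spec_transform string (transform string)

-- ===== LEMMAS AND PROOFS =====

-- the canonical value: index of c in the first-occurrence dedup of l
def pvIdx (l : List Char) (c : Char) : Int := ((PySem.Set.ofList l).idxOf c : Int)

-- the dict A's loop builds, written explicitly
def pvDictOf (l : List Char) : PySem.Dict Char Int :=
  PySem.Dict.mk ((PySem.List.enumerate (PySem.Set.ofList l) 0).map (fun p => (p.2, p.1)))

theorem pvDictOf_keys (l : List Char) : (pvDictOf l).keys = PySem.Set.ofList l := by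
  simp [pvDictOf, PySem.Dict.keys, PySem.List.map_snd_enumerate, List.map_map, Function.comp_def]

theorem pvDictOf_contains (l : List Char) (c : Char) :
    (pvDictOf l).contains c = decide (c ∈ l) := by
  rw [PySem.Dict.contains_eq_decide_mem_keys, pvDictOf_keys]
  simp [PySem.Set.mem_ofList]

theorem pvDictOf_getD (l : List Char) (c : Char) (hc : c ∈ l) :
    (pvDictOf l).getD c 0 = pvIdx l c := by
  have hnd : (pvDictOf l).keys.Nodup := by rw [pvDictOf_keys]; exact PySem.Set.nodup_ofList l
  have hmem : c ∈ PySem.Set.ofList l := (PySem.Set.mem_ofList _ _).mpr hc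
  have hne : (PySem.Set.ofList l).idxOf c ≠ (PySem.Set.ofList l).length := by
    intro h; exact (List.idxOf_eq_length_iff.mp h) hmem
  have hk : (PySem.Set.ofList l).idxOf c < (PySem.Set.ofList l).length :=
    Nat.lt_of_le_of_ne (List.idxOf_le_length) hne
  apply PySem.Dict.getD_of_mem_items _ ?_ hnd
  show (c, pvIdx l c) ∈ (PySem.List.enumerate (PySem.Set.ofList l) 0).map (fun p => (p.2, p.1))
  refine List.mem_map.mpr ⟨(pvIdx l c, c), ?_, rfl⟩
  rw [PySem.List.mem_enumerate_iff]
  exact ⟨(PySem.Set.ofList l).idxOf c, hk, by simp [pvIdx, List.getElem_idxOf hk]⟩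

theorem pvOfList_append_mem (l : List Char) (c : Char) (hc : c ∈ l) :
    PySem.Set.ofList (l ++ [c]) = PySem.Set.ofList l := by
  rw [PySem.Set.ofList_append_singleton, PySem.Set.add_of_mem ((PySem.Set.mem_ofList _ _).mpr hc)]

theorem pvOfList_append_not_mem (l : List Char) (c : Char) (hc : c ∉ l) :
    PySem.Set.ofList (l ++ [c]) = PySem.Set.ofList l ++ [c] := by
  rw [PySem.Set.ofList_append_singleton,
      PySem.Set.add_of_not_mem (fun h => hc ((PySem.Set.mem_ofList _ _).mp h))]

theorem pvDictOf_append_not_mem (l : List Char) (c : Char) (hc : c ∉ l) :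
    pvDictOf (l ++ [c]) = (pvDictOf l).insert c ((PySem.Set.ofList l).length : Int) := by
  have hnc : (pvDictOf l).contains c = false := by
    rw [pvDictOf_contains]; simpa using hc
  apply PySem.Dict.ext
  rw [PySem.Dict.items_insert_of_not_contains _ _ hnc]
  unfold pvDictOf
  rw [pvOfList_append_not_mem l c hc, PySem.List.enumerate_append]
  simp [PySem.List.enumerate]

theorem pvIdx_append_not_mem_old (l : List Char) (c x : Char) (hc : c ∉ l) (hx : x ∈ l) :
    pvIdx (l ++ [c]) x = pvIdx l x := by
  unfold pvIdx
  rw [pvOfList_append_not_mem l c hc,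
      List.idxOf_append_of_mem ((PySem.Set.mem_ofList _ _).mpr hx)]

theorem pvIdx_append_not_mem_self (l : List Char) (c : Char) (hc : c ∉ l) :
    pvIdx (l ++ [c]) c = ((PySem.Set.ofList l).length : Int) := by
  unfold pvIdx
  rw [pvOfList_append_not_mem l c hc,
      List.idxOf_append_of_notMem (fun h => hc ((PySem.Set.mem_ofList _ _).mp h))]
  simp

-- A's loop invariant: after processing l the state is (pvDictOf l, encoded l, #uniques)
theorem transform_loop (l : List Char) :
    l.foldl
      (fun (st : PySem.Dict Char Int × List Int × Int) (c : Char) =>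
        if st.1.contains c then
          (st.1, st.2.1 ++ [st.1.getD c 0], st.2.2)
        else
          ((st.1.insert c st.2.2),
           st.2.1 ++ [(st.1.insert c st.2.2).getD c 0],
           st.2.2 + 1))
      (PySem.Dict.empty, [], 0)
    = (pvDictOf l, l.map (pvIdx l), ((PySem.Set.ofList l).length : Int)) := by
  induction l using List.reverseRecOn with
  | nil => rfl
  | append_singleton l c ih =>
    rw [List.foldl_append, ih]
    by_cases hc : c ∈ l
    · have hct : (pvDictOf l).contains c = true := by rw [pvDictOf_contains]; simpa using hc
      simp only [List.foldl_cons, List.foldl_nil, hct, if_true]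
      have hof := pvOfList_append_mem l c hc
      have hidx : pvIdx (l ++ [c]) = pvIdx l := by funext x; unfold pvIdx; rw [hof]
      simp only [Prod.mk.injEq]
      refine ⟨by unfold pvDictOf; rw [hof], ?_, by rw [hof]⟩
      rw [List.map_append, hidx, pvDictOf_getD l c hc]
      simp
    · have hcf : (pvDictOf l).contains c = false := by rw [pvDictOf_contains]; simpa using hc
      simp only [List.foldl_cons, List.foldl_nil, hcf, Bool.false_eq_true, if_false]
      simp only [Prod.mk.injEq]
      refine ⟨(pvDictOf_append_not_mem l c hc).symm, ?_, ?_⟩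
      · rw [List.map_append, PySem.Dict.getD_insert_self,
            List.map_congr_left (fun x hx => pvIdx_append_not_mem_old l c x hc hx)]
        simp [pvIdx_append_not_mem_self l c hc]
      · rw [pvOfList_append_not_mem l c hc]
        simp

theorem transform_eq_canon (s : String) : transform s = s.toList.map (pvIdx s.toList) := by
  unfold transform
  rw [transform_loop]

-- folding Set.add only ever appends: the start set is a prefix of the result
theorem pvFoldlAdd_prefix (r : List Char) (s : List Char) :
    ∃ w, r.foldl PySem.Set.add s = s ++ w := by
  induction r generalizing s with
  | nil => exact ⟨[], by simp⟩
  | cons a r ih =>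
    simp only [List.foldl_cons]
    by_cases ha : a ∈ s
    · obtain ⟨w, hw⟩ := ih (PySem.Set.add s a)
      exact ⟨w, by rwa [PySem.Set.add_of_mem ha] at hw ⊢⟩
    · obtain ⟨w, hw⟩ := ih (s ++ [a])
      refine ⟨a :: w, ?_⟩
      rw [PySem.Set.add_of_not_mem ha, hw, List.append_assoc]
      simp
  
-- B's closed form: #distinct chars before the first occurrence of c = c's rank in ofList l
theorem pvRank_eq (l : List Char) (c : Char) (hc : c ∈ l) :
    ((PySem.Set.ofList (l.take ((PySem.List.index? l c).getD 0))).length : Int) = pvIdx l c := by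
  obtain ⟨k, hk⟩ := Option.isSome_iff_exists.mp ((PySem.List.index?_isSome_iff _ _).mpr hc)
  obtain ⟨p, r, hl, hlen, hnp⟩ := (PySem.List.index?_eq_some_iff _ _ _).mp hk
  subst hl hlen
  rw [hk, Option.getD_some, List.take_left]
  unfold pvIdx
  have hset : PySem.Set.ofList (p ++ c :: r)
      = r.foldl PySem.Set.add (PySem.Set.ofList p ++ [c]) := by
    rw [PySem.Set.ofList_eq_foldl, List.foldl_append, List.foldl_cons,
        ← PySem.Set.ofList_eq_foldl,
        PySem.Set.add_of_not_mem (fun h => hnp ((PySem.Set.mem_ofList _ _).mp h))]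
  obtain ⟨w, hw⟩ := pvFoldlAdd_prefix r (PySem.Set.ofList p ++ [c])
  rw [hset, hw, List.append_assoc,
      List.idxOf_append_of_notMem (fun h => hnp ((PySem.Set.mem_ofList _ _).mp h))]
  simp

theorem transform_alt_eq_canon (s : String) : transform_alt s = s.toList.map (pvIdx s.toList) := by
  unfold transform_alt
  refine List.map_congr_left (fun c hc => ?_)
  rw [PySem.List.slice_to_natCast]
  exact pvRank_eq s.toList c hc

-- ===== VERDICT (by name: the statement is the Claim_ definition above) =====
theorem transform_spec : Claim_equal_transform := by
  intro s _
  show transform s = transform_alt s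
  rw [transform_eq_canon, transform_alt_eq_canon]
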